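-- pv_equiv track=rewrite | github.com/tushar-1728/DCode | backend/main.py | get_user_info_atcoder
-- ===== SOURCE A (Python) =====
-- def get_user_info_atcoder(user_infos):
--     info = [0] * 7 # #contests, #best_rank, #worst_rank, max_up, max_down, max_rating, current_rating
--     info[1] = info[4] = 100000
--     info[3] = -10000
--     for user_info in user_infos:
--         if user_info["IsRated"] == True:
--             info[0] = info[0]+1
--             info[1] = min(user_info["Place"], info[1])
--             info[2] = max(user_info["Place"], info[2])
--             info[3] = max(user_info["NewRating"]-user_info["OldRating"], info[3])
--             info[4] = min(user_info["NewRating"]-user_info["OldRating"], info[4])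
--             info[5] = max(info[5], user_info["NewRating"])
--             info[6] = user_info["NewRating"]
--     return info
-- ===== SOURCE B (Python) =====
-- def get_user_info_atcoder(user_infos):
--     rated = [u for u in user_infos if u["IsRated"] == True]
--     places = [u["Place"] for u in rated]
--     deltas = [u["NewRating"] - u["OldRating"] for u in rated]
--     news = [u["NewRating"] for u in rated]
--     return [len(rated),
--             min([100000] + places),
--             max([0] + places),
--             max([-10000] + deltas),
--             min([100000] + deltas),
--             max([0] + news),
--             news[-1] if news else 0]
-- ===== Notes on version B (the rewrite author's own statement) =====
-- stated objective: idiomatic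
-- what changed: Replaces A's single fused loop mutating a 7-slot accumulator with a pre-filtered rated list and one separate builtin reduction (len/min/max/last) per output field, with the sentinels folded into each reduction.
import Mathlib
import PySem

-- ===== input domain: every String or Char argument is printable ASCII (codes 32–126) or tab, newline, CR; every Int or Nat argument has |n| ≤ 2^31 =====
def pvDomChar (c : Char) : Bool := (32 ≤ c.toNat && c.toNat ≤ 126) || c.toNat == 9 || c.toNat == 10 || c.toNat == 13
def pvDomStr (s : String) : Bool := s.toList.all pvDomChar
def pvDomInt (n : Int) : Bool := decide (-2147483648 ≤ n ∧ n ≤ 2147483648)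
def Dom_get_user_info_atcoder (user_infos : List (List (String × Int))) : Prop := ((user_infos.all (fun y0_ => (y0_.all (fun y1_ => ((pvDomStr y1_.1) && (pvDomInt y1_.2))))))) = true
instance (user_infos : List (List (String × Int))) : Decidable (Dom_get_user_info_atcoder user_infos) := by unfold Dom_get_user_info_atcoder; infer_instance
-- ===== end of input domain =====

-- B replaces A's fused 7-field accumulator loop with a pre-filtered rated list and one
-- builtin reduction per field (objective: idiomatic decomposition; same asymptotic cost).


-- dict lookup u[k] on the association list: first match; default 0 is never used inside Pre_
-- (Pre_ excludes exactly the missing-key inputs, where Python raises KeyError)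
def pvGet (u : List (String × Int)) (k : String) : Int :=
  ((u.find? (fun p => p.1 == k)).map (·.2)).getD 0

-- ===== PORT A =====
-- literal transliteration: one fused fold carrying all seven fields of `info`
def get_user_info_atcoder (user_infos : List (List (String × Int))) : List Int :=
  let info := user_infos.foldl
    (fun (info : Int × Int × Int × Int × Int × Int × Int) u =>
      if pvGet u "IsRated" = 1 then
        (info.1 + 1,
         min (pvGet u "Place") info.2.1,
         max (pvGet u "Place") info.2.2.1,
         max (pvGet u "NewRating" - pvGet u "OldRating") info.2.2.2.1,
         min (pvGet u "NewRating" - pvGet u "OldRating") info.2.2.2.2.1,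
         max info.2.2.2.2.2.1 (pvGet u "NewRating"),
         pvGet u "NewRating")
      else info)
    (0, 100000, 0, -10000, 100000, 0, 0)
  [info.1, info.2.1, info.2.2.1, info.2.2.2.1, info.2.2.2.2.1, info.2.2.2.2.2.1, info.2.2.2.2.2.2]

-- ===== PORT B =====
-- Python's min([s] ++ xs) / max([s] ++ xs) on ints IS the left fold of min/max from s (exact)
def get_user_info_atcoder_alt (user_infos : List (List (String × Int))) : List Int :=
  let rated := user_infos.filter (fun u => pvGet u "IsRated" == 1)
  let places := rated.map (fun u => pvGet u "Place")
  let deltas := rated.map (fun u => pvGet u "NewRating" - pvGet u "OldRating")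
  let news := rated.map (fun u => pvGet u "NewRating")
  [(rated.length : Int),
   places.foldl min 100000,
   places.foldl max 0,
   deltas.foldl max (-10000),
   deltas.foldl min 100000,
   news.foldl max 0,
   news.getLastD 0]   -- news[-1] if news else 0

-- ===== PRECONDITION & SPEC =====
-- Pre_ excludes exactly the inputs where the Python raises KeyError: a record without "IsRated",
-- or a rated record missing "Place"/"NewRating"/"OldRating".
def Pre_get_user_info_atcoder (user_infos : List (List (String × Int))) : Prop :=
  ∀ u ∈ user_infos,
    (u.find? (fun p => p.1 == "IsRated")).isSome ∧
    (pvGet u "IsRated" = 1 →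
      (u.find? (fun p => p.1 == "Place")).isSome ∧
      (u.find? (fun p => p.1 == "NewRating")).isSome ∧
      (u.find? (fun p => p.1 == "OldRating")).isSome)
instance (user_infos : List (List (String × Int))) : Decidable (Pre_get_user_info_atcoder user_infos) := by
  unfold Pre_get_user_info_atcoder; infer_instance

def pvWitness_get_user_info_atcoder : (List (List (String × Int))) :=
  [[("IsRated", 1), ("Place", 3), ("NewRating", 120), ("OldRating", 100)], [("IsRated", 0)]]

def Spec_get_user_info_atcoder (user_infos : List (List (String × Int))) (out : List Int) : Prop := out = get_user_info_atcoder_alt user_infos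
instance (user_infos : List (List (String × Int))) (out : List Int) : Decidable (Spec_get_user_info_atcoder user_infos out) := by unfold Spec_get_user_info_atcoder; infer_instance

-- ===== CLAIM (what is proved, stated in full; the proofs are below) =====
def Claim_equal_get_user_info_atcoder : Prop := ∀ (user_infos : List (List (String × Int))), Dom_get_user_info_atcoder user_infos → Pre_get_user_info_atcoder user_infos → Spec_get_user_info_atcoder user_infos (get_user_info_atcoder user_infos)

-- ===== LEMMAS AND PROOFS =====

-- A's fused fold, seen from any starting state, equals B's per-field reductions over the filtered list.
theorem pv_loop (l : List (List (String × Int)))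
    (c b w up dn mx cur : Int) :
    l.foldl
      (fun (info : Int × Int × Int × Int × Int × Int × Int) u =>
        if pvGet u "IsRated" = 1 then
          (info.1 + 1,
           min (pvGet u "Place") info.2.1,
           max (pvGet u "Place") info.2.2.1,
           max (pvGet u "NewRating" - pvGet u "OldRating") info.2.2.2.1,
           min (pvGet u "NewRating" - pvGet u "OldRating") info.2.2.2.2.1,
           max info.2.2.2.2.2.1 (pvGet u "NewRating"),
           pvGet u "NewRating")
        else info)
      (c, b, w, up, dn, mx, cur)
    = (c + ((l.filter (fun u => pvGet u "IsRated" == 1)).length : Int),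
       ((l.filter (fun u => pvGet u "IsRated" == 1)).map (fun u => pvGet u "Place")).foldl min b,
       ((l.filter (fun u => pvGet u "IsRated" == 1)).map (fun u => pvGet u "Place")).foldl max w,
       ((l.filter (fun u => pvGet u "IsRated" == 1)).map (fun u => pvGet u "NewRating" - pvGet u "OldRating")).foldl max up,
       ((l.filter (fun u => pvGet u "IsRated" == 1)).map (fun u => pvGet u "NewRating" - pvGet u "OldRating")).foldl min dn,
       ((l.filter (fun u => pvGet u "IsRated" == 1)).map (fun u => pvGet u "NewRating")).foldl max mx,
       ((l.filter (fun u => pvGet u "IsRated" == 1)).map (fun u => pvGet u "NewRating")).getLastD cur) := by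
  induction l generalizing c b w up dn mx cur with
  | nil => simp
  | cons u l ih =>
    by_cases h : pvGet u "IsRated" = 1
    · simp only [List.foldl_cons, List.filter_cons, h, beq_self_eq_true, if_true,
        List.map_cons, List.length_cons, List.getLastD_cons, ih]
      refine congrArg₂ _ (by push_cast; ring) ?_
      rw [min_comm (pvGet u "Place") b, max_comm (pvGet u "Place") w,
        max_comm (pvGet u "NewRating" - pvGet u "OldRating") up,
        min_comm (pvGet u "NewRating" - pvGet u "OldRating") dn]
    · simp only [List.foldl_cons, List.filter_cons, beq_iff_eq, h, if_false, ih]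

-- ===== VERDICT (by name: the statement is the Claim_ definition above) =====
theorem get_user_info_atcoder_spec : Claim_equal_get_user_info_atcoder := by
  intro user_infos _ _
  unfold Spec_get_user_info_atcoder get_user_info_atcoder get_user_info_atcoder_alt
  simp only [pv_loop, zero_add]
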